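-- pv_equiv track=rewrite | github.com/Xin401/leetcode | problems/3315/solution.py | minBitwiseArray
-- ===== SOURCE A (Python) =====
-- from typing import List
--
-- def minBitwiseArray(nums: List[int]) -> List[int]:
--     result = [-1] * len(nums)
--
--     for i in range(len(nums)):
--         if nums[i] % 2 == 0:
--             continue
--         binary = list(format(nums[i], 'b'))
--         for j in range(len(binary)-1, -1, -1):
--             if binary[j] == '0':
--                 binary[j+1] = '0'
--                 result[i] = int(''.join(binary), 2)
--                 break
--             if j == 0:
--                 binary[j] = '0'
--                 result[i] = int(''.join(binary), 2)
--     return result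
-- ===== SOURCE B (Python) =====
-- from typing import List
--
-- # Closed-form bit arithmetic per element, no string formatting or parsing:
-- # for odd v the minimal ans with ans | (ans + 1) == v is v with the set bit
-- # just below v's lowest zero bit cleared.
--
-- def minBitwiseArray(nums: List[int]) -> List[int]:
--     out = []
--     for v in nums:
--         if v % 2 == 0:
--             out.append(-1)
--         else:
--             flipped = v ^ (v + 1)        # trailing ones of v plus the bit above them
--             low = (flipped + 1) >> 1     # v's lowest zero bit, as a power of two
--             out.append(v - (low >> 1))   # clear the set bit just below it
--     return out
-- ===== Notes on version B (the rewrite author's own statement) =====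
-- stated objective: alternative
-- what changed: A formats each number as a binary string, scans the characters backwards for the lowest zero digit, edits the list and re-parses it with int(s,2); B computes the same answer per element with a closed-form bit expression (v ^ (v+1) isolates the trailing ones, two shifts give the bit to clear) with no string formatting, scanning or parsing; Pre_ excludes lists with a negative odd element, which are outside the problem's domain (positive nums) and where A's value is an artefact of its scan hitting/overwriting the '-' sign character.
-- outside the precondition, e.g. on minBitwiseArray([-3]): A returns [3], B returns [-4]; on minBitwiseArray([-5]): A returns [-4], B returns [-7]
import Mathlib
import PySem

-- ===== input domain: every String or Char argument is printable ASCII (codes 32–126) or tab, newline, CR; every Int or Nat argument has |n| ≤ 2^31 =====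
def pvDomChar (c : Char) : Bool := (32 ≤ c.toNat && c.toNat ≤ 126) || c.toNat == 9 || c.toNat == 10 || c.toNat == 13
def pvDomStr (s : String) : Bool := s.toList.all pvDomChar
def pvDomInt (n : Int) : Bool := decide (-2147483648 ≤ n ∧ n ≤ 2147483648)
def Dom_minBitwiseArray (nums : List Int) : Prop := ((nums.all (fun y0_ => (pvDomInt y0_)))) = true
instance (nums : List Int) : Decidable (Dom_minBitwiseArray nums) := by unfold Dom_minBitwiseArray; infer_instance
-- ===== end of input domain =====

-- B replaces A's binary-string formatting/scanning/parsing by a closed-form bit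
-- computation per element; same return value on every input admitted by Pre_.

-- ===== PORT A =====
-- hand port of int(''.join(binary), 2): exact for the strings A builds here
-- (an optional leading '-' followed by '0'/'1' digits); PySem.Int.ofCharsBase?
-- implements the full int(s, 2) syntax, which these strings never use.
def pvParseBits (cs : List Char) : Nat :=
  cs.foldl (fun a c => 2 * a + (if c = '1' then 1 else 0)) 0

def pvParseBin (cs : List Char) : Int :=
  match cs with
  | [] => 0
  | c :: rest => if c = '-' then -(pvParseBits rest : Int) else (pvParseBits (c :: rest) : Int)

-- the inner loop 'for j in range(len(binary)-1, -1, -1)' with its break: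
-- structural recursion on j (the getD default ' ' is never read: j stays in range)
def pvScan (b : List Char) : Nat → List Char
  | 0 => if b.getD 0 ' ' = '0' then b.set 1 '0' else b.set 0 '0'
  | j + 1 => if b.getD (j + 1) ' ' = '0' then b.set (j + 2) '0' else pvScan b j

-- PySem.Int.toBinChars v  =  list(format(nums[i], 'b'))
def pvElemA (v : Int) : Int :=
  if PySem.Int.mod v 2 = 0 then -1
  else pvParseBin (pvScan (PySem.Int.toBinChars v) ((PySem.Int.toBinChars v).length - 1))

def minBitwiseArray (nums : List Int) : List Int := nums.map pvElemA

-- ===== PORT B =====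
def pvElemB (v : Int) : Int :=
  if PySem.Int.mod v 2 = 0 then -1
  else
    -- flipped = v ^ (v + 1); low = (flipped + 1) >> 1; v - (low >> 1)
    v - (((PySem.Int.bxor v (v + 1) + 1) >>> (1 : Nat)) >>> (1 : Nat))

def minBitwiseArray_alt (nums : List Int) : List Int := nums.map pvElemB

-- ===== PRECONDITION & SPEC =====
-- Pre_ excludes lists with a NEGATIVE ODD element: those are outside the
-- problem's domain (positive nums), and there A's value is an artefact of its
-- string scan running into (or overwriting) the '-' sign character.
def Pre_minBitwiseArray (nums : List Int) : Prop :=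
  ∀ v ∈ nums, v < 0 → PySem.Int.mod v 2 = 0
instance (nums : List Int) : Decidable (Pre_minBitwiseArray nums) := by
  unfold Pre_minBitwiseArray; infer_instance

def pvWitness_minBitwiseArray : List Int := [1, 4, -2, 7, 12]

def Spec_minBitwiseArray (nums : List Int) (out : List Int) : Prop := out = minBitwiseArray_alt nums
instance (nums : List Int) (out : List Int) : Decidable (Spec_minBitwiseArray nums out) := by unfold Spec_minBitwiseArray; infer_instance

-- ===== CLAIM (what is proved, stated in full; the proofs are below) =====
def Claim_equal_minBitwiseArray : Prop := ∀ (nums : List Int), Dom_minBitwiseArray nums → Pre_minBitwiseArray nums → Spec_minBitwiseArray nums (minBitwiseArray nums)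

-- ===== LEMMAS AND PROOFS =====

-- proof-side reference function: the value both ports compute for odd m,
-- recursing past the trailing one-bits (fuel argument for totality only)
def pvDropAux : Nat → Nat → Nat
  | 0, m => m - 1
  | f + 1, m => if m % 4 ≠ 3 then m - 1 else 2 * pvDropAux f (m / 2) + 1

def pvDrop (m : Nat) : Nat := pvDropAux m m

lemma pvDropAux_fuel : ∀ f g m, m ≤ f → m ≤ g → pvDropAux f m = pvDropAux g m := by
  intro f
  induction f with
  | zero =>
    intro g m hf _
    interval_cases m
    cases g <;> simp [pvDropAux]
  | succ f ih =>
    intro g m hf hg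
    cases g with
    | zero =>
      interval_cases m
      simp [pvDropAux]
    | succ g =>
      simp only [pvDropAux]
      by_cases h : m % 4 = 3
      · rw [if_neg (by simp [h]), if_neg (by simp [h]),
          ih g (m / 2) (by omega) (by omega)]
      · rw [if_pos h, if_pos h]

lemma pvDrop_eq_of_ne (m : Nat) (h : m % 4 ≠ 3) : pvDrop m = m - 1 := by
  cases m with
  | zero => rfl
  | succ m => simp [pvDrop, pvDropAux, h]

lemma pvDrop_eq_of_eq (m : Nat) (h : m % 4 = 3) : pvDrop m = 2 * pvDrop (m / 2) + 1 := by
  obtain ⟨m', rfl⟩ : ∃ m', m = m' + 1 := ⟨m - 1, by omega⟩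
  show pvDropAux (m' + 1) (m' + 1) = _
  simp only [pvDropAux]
  rw [if_neg (show ¬((m' + 1) % 4 ≠ 3) by omega),
    pvDropAux_fuel m' ((m' + 1) / 2) ((m' + 1) / 2) (by omega) le_rfl]
  rfl

-- Nat.toDigits 2: fuel irrelevance, accumulator elimination, halving recurrence
lemma toDigitsCore_two_fuel : ∀ f g n acc, n < f → n < g →
    Nat.toDigitsCore 2 f n acc = Nat.toDigitsCore 2 g n acc := by
  intro f
  induction f with
  | zero => intro g n acc h; omega
  | succ f ih =>
    intro g n acc hf hg
    obtain ⟨g', rfl⟩ : ∃ g', g = g' + 1 := ⟨g - 1, by omega⟩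
    by_cases h2 : n / 2 = 0
    · simp [Nat.toDigitsCore, h2]
    · have hl : Nat.toDigitsCore 2 (f + 1) n acc
          = Nat.toDigitsCore 2 f (n / 2) (Nat.digitChar (n % 2) :: acc) := by
        simp [Nat.toDigitsCore, h2]
      have hr : Nat.toDigitsCore 2 (g' + 1) n acc
          = Nat.toDigitsCore 2 g' (n / 2) (Nat.digitChar (n % 2) :: acc) := by
        simp [Nat.toDigitsCore, h2]
      rw [hl, hr, ih g' (n / 2) _ (by omega) (by omega)]

lemma toDigitsCore_two_eq : ∀ (f n : Nat) (acc : List Char), n < f →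
    Nat.toDigitsCore 2 f n acc = Nat.toDigits 2 n ++ acc := by
  intro f
  induction f with
  | zero => intro n acc h; omega
  | succ f ih =>
    intro n acc h
    by_cases h2 : n / 2 = 0
    · simp [Nat.toDigits, Nat.toDigitsCore, h2]
    · have hrec : Nat.toDigitsCore 2 (f + 1) n acc
          = Nat.toDigitsCore 2 f (n / 2) (Nat.digitChar (n % 2) :: acc) := by
        simp [Nat.toDigitsCore, h2]
      have hd : Nat.toDigits 2 n
          = Nat.toDigits 2 (n / 2) ++ [Nat.digitChar (n % 2)] := by
        show Nat.toDigitsCore 2 (n + 1) n [] = _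
        have he : Nat.toDigitsCore 2 (n + 1) n []
            = Nat.toDigitsCore 2 n (n / 2) [Nat.digitChar (n % 2)] := by
          simp [Nat.toDigitsCore, h2]
        rw [he, toDigitsCore_two_fuel n f (n / 2) _ (by omega) (by omega),
          ih (n / 2) [Nat.digitChar (n % 2)] (by omega)]
      rw [hrec, ih (n / 2) _ (by omega), hd, List.append_assoc]
      rfl

lemma toDigits_two_base (n : Nat) (h : n < 2) : Nat.toDigits 2 n = [Nat.digitChar n] := by
  interval_cases n <;> rfl

lemma toDigits_two_step (n : Nat) (h : 2 ≤ n) :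
    Nat.toDigits 2 n = Nat.toDigits 2 (n / 2) ++ [Nat.digitChar (n % 2)] := by
  show Nat.toDigitsCore 2 (n + 1) n [] = _
  have h2 : n / 2 ≠ 0 := by omega
  have he : Nat.toDigitsCore 2 (n + 1) n []
      = Nat.toDigitsCore 2 n (n / 2) [Nat.digitChar (n % 2)] := by
    simp [Nat.toDigitsCore, h2]
  rw [he, toDigitsCore_two_eq n (n / 2) _ (by omega)]

lemma digitChar_mod_two (n : Nat) :
    Nat.digitChar (n % 2) = if n % 2 = 1 then '1' else '0' := by
  rcases Nat.mod_two_eq_zero_or_one n with h | h <;> rw [h] <;> rfl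

lemma toDigits_two_length_pos (n : Nat) : 0 < (Nat.toDigits 2 n).length := by
  by_cases h : n < 2
  · rw [toDigits_two_base n h]; simp
  · rw [toDigits_two_step n (by omega)]; simp

lemma toDigits_two_last (n : Nat) :
    (Nat.toDigits 2 n).getD ((Nat.toDigits 2 n).length - 1) ' '
      = if n % 2 = 1 then '1' else '0' := by
  by_cases h : n < 2
  · rw [toDigits_two_base n h]
    have hn : n % 2 = n := by omega
    rw [← digitChar_mod_two, hn]
    rfl
  · rw [toDigits_two_step n (by omega), ← digitChar_mod_two, List.length_append]
    simp only [List.length_singleton, Nat.add_sub_cancel]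
    rw [List.getD_append_right _ _ _ _ le_rfl]
    simp

lemma toDigits_two_chars (n : Nat) : ∀ c ∈ Nat.toDigits 2 n, c = '0' ∨ c = '1' := by
  induction n using Nat.strong_induction_on with
  | _ n ih =>
    by_cases h : n < 2
    · intro c hc
      rw [toDigits_two_base n h] at hc
      simp only [List.mem_singleton] at hc
      subst hc
      interval_cases n
      · left; rfl
      · right; rfl
    · rw [toDigits_two_step n (by omega)]
      intro c hc
      rcases List.mem_append.1 hc with hc | hc
      · exact ih (n / 2) (by omega) c hc
      · simp only [List.mem_singleton] at hc
        subst hc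
        rw [digitChar_mod_two]
        split <;> simp

-- parse lemmas
lemma parseBits_append (L : List Char) (c : Char) :
    pvParseBits (L ++ [c]) = 2 * pvParseBits L + (if c = '1' then 1 else 0) := by
  simp [pvParseBits, List.foldl_append]

lemma parseBits_toDigits (n : Nat) : pvParseBits (Nat.toDigits 2 n) = n := by
  induction n using Nat.strong_induction_on with
  | _ n ih =>
    by_cases h : n < 2
    · rw [toDigits_two_base n h]
      interval_cases n <;> rfl
    · rw [toDigits_two_step n (by omega), parseBits_append, ih (n / 2) (by omega),
        digitChar_mod_two]
      rcases Nat.mod_two_eq_zero_or_one n with h2 | h2 <;> simp [h2] <;> omega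

lemma parseBin_of_binary (cs : List Char) (h : ∀ c ∈ cs, c = '0' ∨ c = '1') :
    pvParseBin cs = (pvParseBits cs : Int) := by
  cases cs with
  | nil => rfl
  | cons c rest =>
    have hb : c = '0' ∨ c = '1' := h c List.mem_cons_self
    have hc : c ≠ '-' := by rcases hb with h' | h' <;> subst h' <;> decide
    simp [pvParseBin, hc]

-- scan lemmas
lemma scan_hit (b : List Char) (j : Nat) (h : b.getD j ' ' = '0') :
    pvScan b j = b.set (j + 1) '0' := by
  cases j with
  | zero => simp only [pvScan]; rw [if_pos h]
  | succ j => simp only [pvScan]; rw [if_pos h]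

lemma scan_is_set (b : List Char) : ∀ j, ∃ k, pvScan b j = b.set k '0' := by
  intro j
  induction j with
  | zero =>
    by_cases h : b.getD 0 ' ' = '0'
    · exact ⟨1, by simp only [pvScan]; rw [if_pos h]⟩
    · exact ⟨0, by simp only [pvScan]; rw [if_neg h]⟩
  | succ j ih =>
    by_cases h : b.getD (j + 1) ' ' = '0'
    · exact ⟨j + 2, by simp only [pvScan]; rw [if_pos h]⟩
    · obtain ⟨k, hk⟩ := ih
      exact ⟨k, by simp only [pvScan]; rw [if_neg h, hk]⟩

lemma set_append_of_lt (L M : List Char) (v : Char) :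
    ∀ j, j < L.length → (L ++ M).set j v = L.set j v ++ M := by
  induction L with
  | nil => intro j h; simp at h
  | cons a t ih =>
    intro j h
    cases j with
    | zero => simp
    | succ j =>
      simp only [List.cons_append, List.set_cons_succ]
      rw [ih j (by simpa using h)]

lemma set_append_last (L : List Char) (c v : Char) :
    (L ++ [c]).set L.length v = L ++ [v] := by
  induction L with
  | nil => rfl
  | cons a t ih => simp [ih]

lemma scan_append (L : List Char) (c : Char)
    (hlast : L.getD (L.length - 1) ' ' ≠ '0') :
    ∀ j, j < L.length → pvScan (L ++ [c]) j = pvScan L j ++ [c] := by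
  intro j
  induction j with
  | zero =>
    intro h
    simp only [pvScan]
    rw [List.getD_append _ _ _ _ h]
    by_cases h0 : L.getD 0 ' ' = '0'
    · have hlen : 1 < L.length := by
        rcases Nat.lt_or_ge 1 L.length with h1 | h1
        · exact h1
        · exfalso; apply hlast
          have he : L.length - 1 = 0 := by omega
          rw [he]; exact h0
      rw [if_pos h0, if_pos h0]
      exact set_append_of_lt L [c] '0' 1 hlen
    · rw [if_neg h0, if_neg h0]
      exact set_append_of_lt L [c] '0' 0 h
  | succ j ih =>
    intro h
    simp only [pvScan]
    rw [List.getD_append _ _ _ _ h]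
    by_cases h0 : L.getD (j + 1) ' ' = '0'
    · have hlen : j + 2 < L.length := by
        rcases Nat.lt_or_ge (j + 2) L.length with h1 | h1
        · exact h1
        · exfalso; apply hlast
          have he : L.length - 1 = j + 1 := by omega
          rw [he]; exact h0
      rw [if_pos h0, if_pos h0]
      exact set_append_of_lt L [c] '0' (j + 2) hlen
    · rw [if_neg h0, if_neg h0]
      exact ih (by omega)

-- A's string scan computes pvDrop on positive odd m
lemma main_pos : ∀ m, m % 2 = 1 →
    pvParseBits (pvScan (Nat.toDigits 2 m) ((Nat.toDigits 2 m).length - 1)) = pvDrop m := by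
  intro m
  induction m using Nat.strong_induction_on with
  | _ m ih =>
    intro hm
    by_cases h1 : m < 2
    · have hm1 : m = 1 := by omega
      subst hm1
      decide
    · set L := Nat.toDigits 2 (m / 2) with hL
      have hDig : Nat.toDigits 2 m = L ++ ['1'] := by
        rw [toDigits_two_step m (by omega), digitChar_mod_two, if_pos hm]
      have hlen : 0 < L.length := toDigits_two_length_pos (m / 2)
      have hlen' : (Nat.toDigits 2 m).length - 1 = (L.length - 1) + 1 := by
        rw [hDig, List.length_append]
        simp only [List.length_singleton]
        omega
      rw [hlen', hDig]
      have hgl : (L ++ ['1']).getD ((L.length - 1) + 1) ' ' = '1' := by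
        have he : (L.length - 1) + 1 = L.length := by omega
        rw [he, List.getD_append_right L ['1'] ' ' L.length le_rfl]
        simp
      have hstep : pvScan (L ++ ['1']) ((L.length - 1) + 1)
          = pvScan (L ++ ['1']) (L.length - 1) := by
        simp only [pvScan, hgl]
        rw [if_neg (by decide)]
      rw [hstep]
      rcases Nat.mod_two_eq_zero_or_one (m / 2) with he | ho
      · -- m/2 even: last char of L is '0'; clear the appended final bit
        have hlast : L.getD (L.length - 1) ' ' = '0' := by
          rw [hL, toDigits_two_last, if_neg (by omega)]
        have hgd : (L ++ ['1']).getD (L.length - 1) ' ' = '0' := by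
          rw [List.getD_append _ _ _ _ (by omega)]
          exact hlast
        rw [scan_hit _ _ hgd]
        have hix : (L.length - 1) + 1 = L.length := by omega
        rw [hix, set_append_last, parseBits_append, hL, parseBits_toDigits]
        rw [if_neg (by decide), pvDrop_eq_of_ne m (by omega)]
        omega
      · -- m/2 odd: scan continues inside L; recurse
        have hlast : L.getD (L.length - 1) ' ' ≠ '0' := by
          rw [hL, toDigits_two_last, if_pos ho]
          decide
        rw [scan_append L '1' hlast (L.length - 1) (by omega), parseBits_append,
          if_pos rfl, hL, ih (m / 2) (by omega) ho,
          pvDrop_eq_of_eq m (by omega)]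

lemma toBinChars_pos (v : Int) (h : 0 < v) :
    PySem.Int.toBinChars v = Nat.toDigits 2 v.toNat := by
  rw [PySem.Int.toBinChars]
  rw [if_neg (show ¬(v < 0) by omega)]

-- B-side: the xor/shift closed form also computes pvDrop on odd m
lemma xor_double (a b r s : Nat) (hr : r < 2) (hs : s < 2) :
    (2 * a + r) ^^^ (2 * b + s) = 2 * (a ^^^ b) + (r ^^^ s) := by
  apply Nat.eq_of_testBit_eq
  intro i
  cases i with
  | zero =>
    simp only [Nat.testBit_zero]
    interval_cases r <;> interval_cases s <;> first
      | (simp; omega)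
      | simp
  | succ i =>
    have h1 : (2 * a + r) / 2 = a := by omega
    have h2 : (2 * b + s) / 2 = b := by omega
    have h3 : (2 * (a ^^^ b) + (r ^^^ s)) / 2 = a ^^^ b := by
      have : r ^^^ s < 2 := by interval_cases r <;> interval_cases s <;> decide
      omega
    rw [Nat.testBit_xor, Nat.testBit_add_one, Nat.testBit_add_one,
      Nat.testBit_add_one, h1, h2, h3, Nat.testBit_xor]

-- flipped = m ^ (m+1): value 1 on even m, halving recurrence on odd m
lemma xor_succ_even (a : Nat) (h : a % 2 = 0) : a ^^^ (a + 1) = 1 := by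
  obtain ⟨c, rfl⟩ : ∃ c, a = 2 * c := ⟨a / 2, by omega⟩
  simpa using xor_double c c 0 1 (by omega) (by omega)

lemma xor_succ_odd (m : Nat) (h : m % 2 = 1) :
    m ^^^ (m + 1) = 2 * ((m / 2) ^^^ (m / 2 + 1)) + 1 := by
  obtain ⟨c, rfl⟩ : ∃ c, m = 2 * c + 1 := ⟨m / 2, by omega⟩
  have hc : (2 * c + 1) / 2 = c := by omega
  have h' := xor_double c (c + 1) 1 0 (by omega) (by omega)
  rw [hc]
  simpa [Nat.mul_add] using h' 

-- low/2 = ((m ^ (m+1)) + 1)/2/2 is the bit pvDrop clears: pvDrop m + low/2 = m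
lemma low_even (a : Nat) (h : a % 2 = 1) : ((a ^^^ (a + 1)) + 1) / 2 % 2 = 0 := by
  rcases Nat.mod_two_eq_zero_or_one ((a / 2)) with he | ho
  · have h2 : a / 2 ^^^ (a / 2 + 1) = 1 := xor_succ_even _ he
    rw [xor_succ_odd a h, h2]
  · rw [xor_succ_odd a h, xor_succ_odd (a / 2) ho]
    omega

lemma drop_add (m : Nat) (hm : m % 2 = 1) :
    pvDrop m + (((m ^^^ (m + 1)) + 1) / 2) / 2 = m := by
  induction m using Nat.strong_induction_on with
  | _ m ih =>
    rcases Nat.mod_two_eq_zero_or_one (m / 2) with he | ho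
    · -- m % 4 = 1: flipped = 3, the cleared bit is 1
      rw [xor_succ_odd m hm, xor_succ_even (m / 2) he,
        pvDrop_eq_of_ne m (by omega)]
      omega
    · -- m % 4 = 3: recurse on m / 2
      have hX : m ^^^ (m + 1) = 2 * ((m / 2) ^^^ (m / 2 + 1)) + 1 :=
        xor_succ_odd m hm
      have hXodd : ((m / 2) ^^^ (m / 2 + 1)) % 2 = 1 := by
        rw [xor_succ_odd (m / 2) ho]
        omega
      have hIH := ih (m / 2) (by omega) ho
      have hLe := low_even (m / 2) ho
      rw [hX, pvDrop_eq_of_eq m (by omega)]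
      omega

-- Int-level bridge: for odd v ≥ 1 port B's expression equals pvDrop v.toNat
lemma elemB_pos (v : Int) (hv : 0 < v) (hm : v.toNat % 2 = 1) :
    v - (((PySem.Int.bxor v (v + 1) + 1) >>> (1 : Nat)) >>> (1 : Nat))
      = (pvDrop v.toNat : Int) := by
  set m := v.toNat with hmdef
  have h1 : v = (m : Int) := by omega
  have h2 : v + 1 = ((m + 1 : Nat) : Int) := by omega
  rw [h2, h1, PySem.Int.bxor_natCast]
  have h3 : ((m ^^^ (m + 1) : Nat) : Int) + 1 = (((m ^^^ (m + 1)) + 1 : Nat) : Int) := by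
    push_cast
    ring
  rw [h3]
  have hsh : ∀ n : Nat, ((n : Int) >>> (1 : Nat)) = ((n >>> 1 : Nat) : Int) := by
    intro n
    simp [Int.shiftRight_eq_div_pow, Nat.shiftRight_eq_div_pow]
  rw [hsh, hsh]
  have hd := drop_add m hm
  simp only [Nat.shiftRight_eq_div_pow, pow_one]
  omega

-- per-element equality of the two ports on Pre_-admitted elements
lemma elem_eq (v : Int) (hpre : v < 0 → PySem.Int.mod v 2 = 0) :
    pvElemA v = pvElemB v := by
  unfold pvElemA pvElemB
  by_cases h : PySem.Int.mod v 2 = 0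
  · rw [if_pos h, if_pos h]
  · rw [if_neg h, if_neg h]
    have hmod : v % 2 ≠ 0 := by
      rwa [PySem.Int.mod_eq_emod_of_pos (by norm_num)] at h
    have hv : 0 < v := by
      rcases lt_trichotomy v 0 with hlt | h0 | hgt
      · exact absurd (hpre hlt) h
      · exact absurd (by rw [h0]; rfl) hmod
      · exact hgt
    have hm : v.toNat % 2 = 1 := by omega
    rw [toBinChars_pos v hv]
    have hchars : ∀ c ∈ pvScan (Nat.toDigits 2 v.toNat)
        ((Nat.toDigits 2 v.toNat).length - 1), c = '0' ∨ c = '1' := by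
      obtain ⟨k, hk⟩ := scan_is_set (Nat.toDigits 2 v.toNat)
        ((Nat.toDigits 2 v.toNat).length - 1)
      rw [hk]
      intro c hc
      rcases List.mem_or_eq_of_mem_set hc with hc | hc
      · exact toDigits_two_chars v.toNat c hc
      · exact Or.inl hc
    rw [parseBin_of_binary _ hchars, main_pos v.toNat hm, elemB_pos v hv hm]

-- ===== VERDICT (by name: the statement is the Claim_ definition above) =====
theorem minBitwiseArray_spec : Claim_equal_minBitwiseArray := by
  intro nums _ hpre
  unfold Spec_minBitwiseArray minBitwiseArray minBitwiseArray_alt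
  exact List.map_congr_left (fun v hv => elem_eq v (hpre v hv))
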